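-- pv_equiv track=rewrite | github.com/yienMaster/ECUST-412 | 20届智能车竞赛/极速光电（NXP）/软件/car_control/第九版/condition_machine_false.py | ccd_road_find
-- ===== SOURCE A (Python) =====
-- def ccd_road_find(ccd_data):
--     n = len(ccd_data)
--     if n == 0:
--         return 0, 0, 0
--     mid_point = n // 2
--
--     # 检测所有连续白色区域（100的区域）
--     def find_white_regions(data):
--         regions = []
--         start = None
--         for i in range(len(data)):
--             if data[i] == 100:
--                 if start is None:
--                     start = i
--             else:
--                 if start is not None:
--                     regions.append((start, i - 1))
--                     start = None
--         # 处理最后一个区域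
--         if start is not None:
--             regions.append((start, len(data) - 1))
--         return regions
--
--     # 根据中心点选择主区域
--     def select_main_region(regions, mid):
--         # 优先选择包含中心点的区域
--         for region in regions:
--             start, end = region
--             if start <= mid <= end:
--                 return region
--         # 若无，则选择优先级最高的区域（距离近、宽度大、起始点靠右）
--         selected = None
--         for region in regions:
--             start, end = region
--             width = end - start + 1
--             # 计算到中心点的最小距离
--             dist_start = abs(start - mid)
--             dist_end = abs(end - mid)
--             current_dist = min(dist_start, dist_end)
--             # 优先级元组：距离小、宽度大、起始点大（元组越小越优先）
--             priority = (current_dist, -width, -start)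
--             if selected is None or priority < selected[1]:
--                 selected = (region, priority)
--         return selected[0] if selected else None
--
--     regions = find_white_regions(ccd_data)
--     if not regions:
--         return 0, 0, 0
--     main_region = select_main_region(regions, mid_point)
--     if not main_region:
--         # 默认选第一个区域（极少数情况）
--         main_region = regions[0]
--     left, right = main_region
--     return left, right, right - left
-- ===== SOURCE B (Python) =====
-- def ccd_road_find(ccd_data):
--     # Local search around the midpoint instead of collecting all white runs:
--     # only the run containing mid, or the nearest runs on each side, can win.
--     n = len(ccd_data)
--     if n == 0:
--         return 0, 0, 0
--     mid = n // 2
--     if ccd_data[mid] == 100: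
--         # expand the run containing mid in both directions
--         l = mid
--         while l > 0 and ccd_data[l - 1] == 100:
--             l -= 1
--         r = mid
--         while r + 1 < n and ccd_data[r + 1] == 100:
--             r += 1
--         return l, r, r - l
--     # nearest white run strictly left of mid
--     j = mid - 1
--     while j >= 0 and ccd_data[j] != 100:
--         j -= 1
--     left_run = None
--     if j >= 0:
--         s = j
--         while s > 0 and ccd_data[s - 1] == 100:
--             s -= 1
--         left_run = (s, j)
--     # nearest white run strictly right of mid
--     k = mid + 1
--     while k < n and ccd_data[k] != 100:
--         k += 1
--     right_run = None
--     if k < n: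
--         e = k
--         while e + 1 < n and ccd_data[e + 1] == 100:
--             e += 1
--         right_run = (k, e)
--     if left_run is None and right_run is None:
--         return 0, 0, 0
--     if left_run is None:
--         l, r = right_run
--     elif right_run is None:
--         l, r = left_run
--     else:
--         sL, eL = left_run
--         sR, eR = right_run
--         pL = (mid - eL, -(eL - sL + 1), -sL)
--         pR = (sR - mid, -(eR - sR + 1), -sR)
--         l, r = right_run if pR < pL else left_run
--     return l, r, r - l
-- ===== Notes on version B (the rewrite author's own statement) =====
-- stated objective: alternative
-- what changed: Instead of collecting every white run into a list and then selecting by a priority key, B does a local search around the midpoint: expand the run containing mid if ccd[mid] is white, otherwise find only the nearest run on each side of mid by scanning outward and compare those two candidates (no other run can win the priority comparison).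
import Mathlib
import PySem

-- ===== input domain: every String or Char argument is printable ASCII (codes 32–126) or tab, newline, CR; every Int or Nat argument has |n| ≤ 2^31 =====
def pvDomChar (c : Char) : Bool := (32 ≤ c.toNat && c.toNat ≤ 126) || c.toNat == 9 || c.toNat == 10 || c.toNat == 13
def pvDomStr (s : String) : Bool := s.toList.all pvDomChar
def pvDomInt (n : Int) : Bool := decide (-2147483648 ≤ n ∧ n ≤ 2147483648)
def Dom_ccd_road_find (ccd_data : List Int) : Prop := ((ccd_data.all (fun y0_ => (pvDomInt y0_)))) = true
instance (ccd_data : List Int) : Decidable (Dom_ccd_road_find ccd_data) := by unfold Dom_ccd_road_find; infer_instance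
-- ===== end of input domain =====

-- B replaces A's collect-all-runs-then-select-by-key scheme by a local search around the
-- midpoint (expand the run containing mid, else compare only the nearest run on each side).

-- ===== PORT A =====
-- Python tuple lexicographic '<' on a 3-tuple of ints (shared by both ports)
def pLt (p q : Int × Int × Int) : Bool :=
  decide (p.1 < q.1 ∨ (p.1 = q.1 ∧ (p.2.1 < q.2.1 ∨ (p.2.1 = q.2.1 ∧ p.2.2 < q.2.2))))

-- A's find_white_regions loop; i is Python's loop index (a Nat from range), s the open run
-- start.  Whenever a pair (start, i-1) is appended, start was recorded at an earlier index,
-- so i ≥ 1 and Nat subtraction i-1 is exactly Python's i-1.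
def findWhiteRegions : List Int → Nat → Option Nat → List (Nat × Nat)
  | [], _, none => []
  | [], i, some s => [(s, i - 1)]
  | d :: rest, i, s =>
    if d = 100 then
      findWhiteRegions rest (i + 1) (match s with | none => some i | some s0 => some s0)
    else
      match s with
      | some s0 => (s0, i - 1) :: findWhiteRegions rest (i + 1) none
      | none => findWhiteRegions rest (i + 1) none

-- A's first selection loop: first region containing mid
def findContaining (mid : Nat) : List (Nat × Nat) → Option (Nat × Nat)
  | [] => none
  | (s, e) :: rest => if s ≤ mid ∧ mid ≤ e then some (s, e) else findContaining mid rest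

-- A's priority tuple (dist, -width, -start); all indices are in range, so |·| over Int is exact
def prioA (mid s e : Nat) : Int × Int × Int :=
  (min |(s : Int) - mid| |(e : Int) - mid|, -((e : Int) - s + 1), -(s : Int))

-- A's second selection loop body; 'sel' holds (region, priority)
def bestStep (mid : Nat) (sel : Option ((Nat × Nat) × (Int × Int × Int))) (r : Nat × Nat) :
    Option ((Nat × Nat) × (Int × Int × Int)) :=
  let p := prioA mid r.1 r.2
  match sel with
  | none => some (r, p)
  | some sp => if pLt p sp.2 then some (r, p) else sel

def selectMainRegion (regions : List (Nat × Nat)) (mid : Nat) : Option (Nat × Nat) :=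
  match findContaining mid regions with
  | some r => some r
  | none =>
    match regions.foldl (bestStep mid) none with
    | some sp => some sp.1
    | none => none

def ccd_road_find (ccd_data : List Int) : Int × Int × Int :=
  if ccd_data.length = 0 then (0, 0, 0)
  else
    let mid := ccd_data.length / 2   -- Python n // 2 on a nonnegative n = Nat division
    let regions := findWhiteRegions ccd_data 0 none
    match regions with
    | [] => (0, 0, 0)
    | r0 :: _ =>
      let m := match selectMainRegion regions mid with
               | some r => r
               | none => r0   -- Python's 'default to regions[0]' fallback
      ((m.1 : Int), (m.2 : Int), (m.2 : Int) - m.1)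

-- ===== PORT B =====
-- Source B's 'while l > 0 and ccd[l-1] == 100: l -= 1' (every index read is in range, so getD is exact)
def expandL (d : List Int) : Nat → Nat
  | 0 => 0
  | l + 1 => if d.getD l 0 = 100 then expandL d l else l + 1

-- Source B's 'while r + 1 < n and ccd[r+1] == 100: r += 1'
def expandR (d : List Int) (n : Nat) (r : Nat) : Nat :=
  if r + 1 < n ∧ d.getD (r + 1) 0 = 100 then expandR d n (r + 1) else r
termination_by n - r
decreasing_by omega

-- Source B's 'j = mid-1; while j >= 0 and ccd[j] != 100: j -= 1' ; argument = j+1, none = j reached -1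
def scanL (d : List Int) : Nat → Option Nat
  | 0 => none
  | j + 1 => if d.getD j 0 = 100 then some j else scanL d j

-- Source B's 'k = mid+1; while k < n and ccd[k] != 100: k += 1' ; none = k reached n
def scanR (d : List Int) (n : Nat) (k : Nat) : Option Nat :=
  if k < n then (if d.getD k 0 = 100 then some k else scanR d n (k + 1)) else none
termination_by n - k
decreasing_by omega

def ccd_road_find_alt (ccd_data : List Int) : Int × Int × Int :=
  let n := ccd_data.length
  if n = 0 then (0, 0, 0)
  else
    let mid := n / 2
    if ccd_data.getD mid 0 = 100 then
      let l := expandL ccd_data mid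
      let r := expandR ccd_data n mid
      ((l : Int), (r : Int), (r : Int) - l)
    else
      let leftRun : Option (Nat × Nat) :=
        match scanL ccd_data mid with
        | some j => some (expandL ccd_data j, j)
        | none => none
      let rightRun : Option (Nat × Nat) :=
        match scanR ccd_data n (mid + 1) with
        | some k => some (k, expandR ccd_data n k)
        | none => none
      match leftRun, rightRun with
      | none, none => (0, 0, 0)
      | none, some (l, r) => ((l : Int), (r : Int), (r : Int) - l)
      | some (l, r), none => ((l : Int), (r : Int), (r : Int) - l)
      | some (sL, eL), some (sR, eR) =>
        let pL : Int × Int × Int := ((mid : Int) - eL, -((eL : Int) - sL + 1), -(sL : Int))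
        let pR : Int × Int × Int := ((sR : Int) - mid, -((eR : Int) - sR + 1), -(sR : Int))
        let lr := if pLt pR pL then (sR, eR) else (sL, eL)
        ((lr.1 : Int), (lr.2 : Int), (lr.2 : Int) - lr.1)

-- ===== PRECONDITION & SPEC =====
def Spec_ccd_road_find (ccd_data : List Int) (out : Int × Int × Int) : Prop := out = ccd_road_find_alt ccd_data
instance (ccd_data : List Int) (out : Int × Int × Int) : Decidable (Spec_ccd_road_find ccd_data out) := by unfold Spec_ccd_road_find; infer_instance

-- ===== CLAIM (what is proved, stated in full; the proofs are below) =====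
def Claim_equal_ccd_road_find : Prop := ∀ (ccd_data : List Int), Dom_ccd_road_find ccd_data → Spec_ccd_road_find ccd_data (ccd_road_find ccd_data)

-- ===== LEMMAS AND PROOFS =====

-- 'index t of d is white'
def W (d : List Int) (t : Nat) : Prop := d.getD t 0 = 100

-- maximal white run
def IsRun (d : List Int) (p : Nat × Nat) : Prop :=
  p.1 ≤ p.2 ∧ p.2 < d.length ∧ (∀ t, p.1 ≤ t → t ≤ p.2 → W d t) ∧
    (p.1 = 0 ∨ ¬ W d (p.1 - 1)) ∧ ¬ W d (p.2 + 1)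

theorem W_lt_length {d : List Int} {t : Nat} (h : W d t) : t < d.length := by
  by_contra hc
  have hd : d.getD t 0 = 0 := List.getD_eq_default _ _ (by omega)
  unfold W at h
  rw [hd] at h
  exact absurd h (by norm_num)

theorem not_W_of_ge {d : List Int} {t : Nat} (h : d.length ≤ t) : ¬ W d t := by
  intro hW; exact absurd (W_lt_length hW) (by omega)

theorem drop_cons {d : List Int} {i : Nat} {x : Int} {rest : List Int}
    (h : d.drop i = x :: rest) : d.getD i 0 = x ∧ d.drop (i + 1) = rest ∧ i < d.length := by
  have hi : i < d.length := by
    by_contra hc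
    rw [List.drop_eq_nil_of_le (by omega)] at h
    simp at h
  have h0 : d[i]? = some x := by
    have h1 : (d.drop i)[(0 : Nat)]? = d[i + 0]? := List.getElem?_drop
    rw [h] at h1
    simpa using h1.symm
  refine ⟨?_, ?_, hi⟩
  · rw [List.getD_eq_getElem?_getD, h0]; rfl
  · have h1 : d.drop (i + 1) = (d.drop i).drop 1 := by rw [List.drop_drop]
    rw [h1, h]; rfl

-- soundness and coverage of find_white_regions, generalised over its recursion
theorem fw_spec (d : List Int) : ∀ (l : List Int) (i : Nat) (s : Option Nat),
    l = d.drop i → i ≤ d.length →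
    (∀ s0, s = some s0 → s0 < i ∧ (∀ t, s0 ≤ t → t < i → W d t) ∧ (s0 = 0 ∨ ¬ W d (s0 - 1))) →
    (s = none → (i = 0 ∨ ¬ W d (i - 1))) →
    (∀ p ∈ findWhiteRegions l i s, IsRun d p) ∧
    (∀ t, W d t → (i ≤ t ∨ ∃ s0, s = some s0 ∧ s0 ≤ t) →
      ∃ p ∈ findWhiteRegions l i s, p.1 ≤ t ∧ t ≤ p.2) := by
  intro l
  induction l with
  | nil =>
    intro i s hdrop hlen hs hn
    have hieq : i = d.length := by
      by_contra hc
      have hi : i < d.length := by omega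
      have hne : d.drop i ≠ [] := by
        intro he
        have hl := List.length_drop (l := d) (i := i)
        rw [he] at hl; simp at hl; omega
      exact hne hdrop.symm
    cases s with
    | none =>
      constructor
      · intro p hp; simp [findWhiteRegions] at hp
      · intro t hW hcond
        rcases hcond with h | ⟨s0, hs0, _⟩
        · exact absurd (W_lt_length hW) (by omega)
        · simp at hs0
    | some s0 =>
      obtain ⟨hs0i, hwhite, hleft⟩ := hs s0 rfl
      constructor
      · intro p hp
        simp [findWhiteRegions] at hp
        subst hp
        refine ⟨by omega, by omega, ?_, ?_, ?_⟩
        · intro t ht1 ht2; exact hwhite t ht1 (by omega)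
        · exact hleft
        · have he : i - 1 + 1 = d.length := by omega
          rw [he]; exact not_W_of_ge (le_refl _)
      · intro t hW hcond
        have ht : t < d.length := W_lt_length hW
        have hst : s0 ≤ t := by
          rcases hcond with h | ⟨s1, hs1, hle⟩
          · omega
          · cases hs1; exact hle
        exact ⟨(s0, i - 1), by simp [findWhiteRegions], by simp; omega⟩
  | cons x rest ih =>
    intro i s hdrop hlen hs hn
    obtain ⟨hget, hdrop', hi⟩ := drop_cons hdrop.symm
    have hWi : W d i ↔ x = 100 := by unfold W; rw [hget]
    by_cases hx : x = 100
    · -- head is white: open or extend the run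
      cases s with
      | none =>
        have hs' : ∀ s0, (some i : Option Nat) = some s0 →
            s0 < i + 1 ∧ (∀ t, s0 ≤ t → t < i + 1 → W d t) ∧ (s0 = 0 ∨ ¬ W d (s0 - 1)) := by
          intro s0 h0
          cases h0
          refine ⟨by omega, ?_, hn rfl⟩
          intro t ht1 ht2
          have ht : t = i := by omega
          subst ht; exact hWi.mpr hx
        obtain ⟨ha, hb⟩ := ih (i + 1) (some i) hdrop'.symm (by omega) hs' (by simp)
        have hfw : findWhiteRegions (x :: rest) i none = findWhiteRegions rest (i + 1) (some i) := by
          simp [findWhiteRegions, hx]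
        rw [hfw]
        constructor
        · exact ha
        · intro t hW hcond
          apply hb t hW
          rcases hcond with h | ⟨s1, hs1, _⟩
          · by_cases hti : t = i
            · exact Or.inr ⟨i, rfl, by omega⟩
            · exact Or.inl (by omega)
          · simp at hs1
      | some s1 =>
        obtain ⟨hs1i, hs1w, hs1l⟩ := hs s1 rfl
        have hs' : ∀ s0, (some s1 : Option Nat) = some s0 →
            s0 < i + 1 ∧ (∀ t, s0 ≤ t → t < i + 1 → W d t) ∧ (s0 = 0 ∨ ¬ W d (s0 - 1)) := by
          intro s0 h0
          cases h0
          obtain ⟨h1, h2, h3⟩ := hs s1 rfl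
          refine ⟨by omega, ?_, h3⟩
          intro t ht1 ht2
          by_cases hti : t = i
          · subst hti; exact hWi.mpr hx
          · exact h2 t ht1 (by omega)
        obtain ⟨ha, hb⟩ := ih (i + 1) (some s1) hdrop'.symm (by omega) hs' (by simp)
        have hfw : findWhiteRegions (x :: rest) i (some s1) =
            findWhiteRegions rest (i + 1) (some s1) := by
          simp [findWhiteRegions, hx]
        rw [hfw]
        constructor
        · exact ha
        · intro t hW hcond
          apply hb t hW
          rcases hcond with h | ⟨s2, hs2, hle⟩
          · exact Or.inr ⟨s1, rfl, by omega⟩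
          · cases hs2; exact Or.inr ⟨s1, rfl, hle⟩
    · -- head is not white: close the open run (if any)
      have hnWi : ¬ W d i := fun h => hx (hWi.mp h)
      cases s with
      | none =>
        obtain ⟨ha, hb⟩ := ih (i + 1) none hdrop'.symm (by omega)
          (by intro s0 h0; simp at h0) (fun _ => Or.inr (by simpa using hnWi))
        have hfw : findWhiteRegions (x :: rest) i none = findWhiteRegions rest (i + 1) none := by
          simp [findWhiteRegions, hx]
        rw [hfw]
        constructor
        · exact ha
        · intro t hW hcond
          have hti : i + 1 ≤ t := by
            rcases hcond with h | ⟨s1, hs1, _⟩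
            · rcases Nat.eq_or_lt_of_le h with h' | h'
              · exact absurd hW (h' ▸ hnWi)
              · omega
            · simp at hs1
          exact hb t hW (Or.inl hti)
      | some s0 =>
        obtain ⟨hs0i, hwhite, hleft⟩ := hs s0 rfl
        obtain ⟨ha, hb⟩ := ih (i + 1) none hdrop'.symm (by omega)
          (by intro s1 h1; simp at h1) (fun _ => Or.inr (by simpa using hnWi))
        have hrun : IsRun d (s0, i - 1) := by
          refine ⟨by omega, by omega, ?_, hleft, ?_⟩
          · intro t ht1 ht2; exact hwhite t ht1 (by omega)
          · have he : i - 1 + 1 = i := by omega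
            rw [he]; exact hnWi
        have hfw : findWhiteRegions (x :: rest) i (some s0) =
            (s0, i - 1) :: findWhiteRegions rest (i + 1) none := by
          simp [findWhiteRegions, hx]
        rw [hfw]
        constructor
        · intro p hp
          rcases List.mem_cons.mp hp with h | h
          · exact h ▸ hrun
          · exact ha p h
        · intro t hW hcond
          by_cases hti : t ≤ i - 1
          · have hst : s0 ≤ t := by
              rcases hcond with h | ⟨s1, hs1, hle⟩
              · omega
              · cases hs1; exact hle
            exact ⟨(s0, i - 1), by simp, by simp; omega⟩
          · have hti' : i + 1 ≤ t := by
              rcases Nat.lt_or_ge t (i + 1) with h | h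
              · have he : t = i := by omega
                exact absurd hW (he ▸ hnWi)
              · exact h
            obtain ⟨p, hp1, hp2⟩ := hb t hW (Or.inl hti')
            exact ⟨p, by simp [hp1], hp2⟩

-- a maximal run containing a given index is unique
theorem run_unique {d : List Int} {p q : Nat × Nat} (hp : IsRun d p) (hq : IsRun d q)
    {t : Nat} (hpt1 : p.1 ≤ t) (hpt2 : t ≤ p.2) (hqt1 : q.1 ≤ t) (hqt2 : t ≤ q.2) : p = q := by
  obtain ⟨hp1, hp2, hpw, hpl, hpr⟩ := hp
  obtain ⟨hq1, hq2, hqw, hql, hqr⟩ := hq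
  have h1 : p.1 = q.1 := by
    rcases Nat.lt_trichotomy p.1 q.1 with h | h | h
    · exfalso
      have hw : W d (q.1 - 1) := hpw _ (by omega) (by omega)
      rcases hql with h' | h'
      · omega
      · exact h' hw
    · exact h
    · exfalso
      have hw : W d (p.1 - 1) := hqw _ (by omega) (by omega)
      rcases hpl with h' | h'
      · omega
      · exact h' hw
  have h2 : p.2 = q.2 := by
    rcases Nat.lt_trichotomy p.2 q.2 with h | h | h
    · exact absurd (hqw _ (by omega) (by omega)) hpr
    · exact h
    · exact absurd (hpw _ (by omega) (by omega)) hqr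
  exact Prod.ext h1 h2

-- expandL expands to the maximal run start (given the start index is white)
theorem expandL_spec (d : List Int) : ∀ m, W d m →
    expandL d m ≤ m ∧ (∀ t, expandL d m ≤ t → t ≤ m → W d t) ∧
      (expandL d m = 0 ∨ ¬ W d (expandL d m - 1)) := by
  intro m
  induction m with
  | zero =>
    intro hW
    refine ⟨Nat.le_refl 0, ?_, Or.inl rfl⟩
    intro t _ h2
    have ht : t = 0 := Nat.le_zero.mp h2
    exact ht ▸ hW
  | succ l ih =>
    intro hW
    by_cases hl : d.getD l 0 = 100
    · have hWl : W d l := hl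
      obtain ⟨h1, h2, h3⟩ := ih hWl
      rw [show expandL d (l + 1) = expandL d l from by simp only [expandL]; rw [if_pos hl]]
      refine ⟨by omega, ?_, h3⟩
      intro t ht1 ht2
      by_cases h : t = l + 1
      · exact h ▸ hW
      · exact h2 t ht1 (by omega)
    · rw [show expandL d (l + 1) = l + 1 from by simp only [expandL]; rw [if_neg hl]]
      refine ⟨le_refl _, ?_, Or.inr (by simpa [W] using hl)⟩
      intro t ht1 ht2
      have : t = l + 1 := by omega
      exact this ▸ hW

-- expandR expands to the maximal run end (n = length)
theorem expandR_spec (d : List Int) : ∀ k r, d.length - r = k → W d r →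
    r ≤ expandR d d.length r ∧ (∀ t, r ≤ t → t ≤ expandR d d.length r → W d t) ∧
      ¬ W d (expandR d d.length r + 1) := by
  intro k
  induction k with
  | zero =>
    intro r hk hW
    have : ¬ (r + 1 < d.length ∧ d.getD (r + 1) 0 = 100) := by
      intro ⟨h, _⟩; omega
    rw [show expandR d d.length r = r from by rw [expandR, if_neg this]]
    refine ⟨le_refl _, ?_, not_W_of_ge (by omega)⟩
    intro t h1 h2
    have : t = r := by omega
    exact this ▸ hW
  | succ k ih =>
    intro r hk hW
    by_cases hc : r + 1 < d.length ∧ d.getD (r + 1) 0 = 100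
    · have heq : expandR d d.length r = expandR d d.length (r + 1) := by
        rw [expandR, if_pos hc]
      obtain ⟨h1, h2, h3⟩ := ih (r + 1) (by omega) hc.2
      rw [heq]
      refine ⟨by omega, ?_, h3⟩
      intro t ht1 ht2
      by_cases h : t = r
      · exact h ▸ hW
      · exact h2 t (by omega) ht2
    · rw [show expandR d d.length r = r from by rw [expandR, if_neg hc]]
      refine ⟨le_refl _, ?_, ?_⟩
      · intro t h1 h2
        have : t = r := by omega
        exact this ▸ hW
      · rcases Nat.lt_or_ge (r + 1) d.length with h | h
        · intro hW'
          exact hc ⟨h, hW'⟩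
        · exact not_W_of_ge h

theorem scanL_some (d : List Int) : ∀ m j, scanL d m = some j →
    j < m ∧ W d j ∧ ∀ t, j < t → t < m → ¬ W d t := by
  intro m
  induction m with
  | zero => intro j h; simp [scanL] at h
  | succ l ih =>
    intro j h
    by_cases hl : d.getD l 0 = 100
    · simp only [scanL] at h
      rw [if_pos hl] at h
      simp only [Option.some.injEq] at h
      subst h
      exact ⟨by omega, hl, fun t h1 h2 => by omega⟩
    · simp only [scanL] at h
      rw [if_neg hl] at h
      obtain ⟨h1, h2, h3⟩ := ih j h
      refine ⟨by omega, h2, ?_⟩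
      intro t ht1 ht2
      by_cases ht : t = l
      · exact ht ▸ fun hW => hl hW
      · exact h3 t ht1 (by omega)

theorem scanL_none (d : List Int) : ∀ m, scanL d m = none → ∀ t, t < m → ¬ W d t := by
  intro m
  induction m with
  | zero => intro _ t h; omega
  | succ l ih =>
    intro h t ht
    by_cases hl : d.getD l 0 = 100
    · simp only [scanL] at h
      rw [if_pos hl] at h
      simp at h
    · simp only [scanL] at h
      rw [if_neg hl] at h
      by_cases htl : t = l
      · exact htl ▸ fun hW => hl hW
      · exact ih h t (by omega)

theorem scanR_some (d : List Int) : ∀ m k k', d.length - k = m → scanR d d.length k = some k' →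
    k ≤ k' ∧ k' < d.length ∧ W d k' ∧ ∀ t, k ≤ t → t < k' → ¬ W d t := by
  intro m
  induction m with
  | zero =>
    intro k k' hm h
    rw [scanR, if_neg (show ¬ k < d.length from by omega)] at h
    simp at h
  | succ m ih =>
    intro k k' hm h
    have hk : k < d.length := by omega
    by_cases hw : d.getD k 0 = 100
    · rw [scanR, if_pos hk, if_pos hw] at h
      simp only [Option.some.injEq] at h
      subst h
      exact ⟨le_refl _, hk, hw, fun t h1 h2 => by omega⟩
    · rw [scanR, if_pos hk, if_neg hw] at h
      obtain ⟨h1, h2, h3, h4⟩ := ih (k + 1) k' (by omega) h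
      refine ⟨by omega, h2, h3, ?_⟩
      intro t ht1 ht2
      by_cases ht : t = k
      · exact ht ▸ fun hW => hw hW
      · exact h4 t (by omega) ht2

theorem scanR_none (d : List Int) : ∀ m k, d.length - k = m → scanR d d.length k = none →
    ∀ t, k ≤ t → ¬ W d t := by
  intro m
  induction m with
  | zero =>
    intro k hm _ t ht
    exact not_W_of_ge (by omega)
  | succ m ih =>
    intro k hm h t ht
    have hk : k < d.length := by omega
    by_cases hw : d.getD k 0 = 100
    · rw [scanR, if_pos hk, if_pos hw] at h
      simp at h
    · rw [scanR, if_pos hk, if_neg hw] at h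
      by_cases htk : t = k
      · exact htk ▸ fun hW => hw hW
      · exact ih (k + 1) (by omega) h t (by omega)

theorem findContaining_none {mid : Nat} : ∀ {R : List (Nat × Nat)},
    (∀ p ∈ R, ¬ (p.1 ≤ mid ∧ mid ≤ p.2)) → findContaining mid R = none := by
  intro R
  induction R with
  | nil => intro _; rfl
  | cons r rest ih =>
    intro h
    obtain ⟨s, e⟩ := r
    have := h (s, e) (by simp)
    simp [findContaining, this]
    exact ih (fun p hp => h p (by simp [hp]))

theorem findContaining_some {mid : Nat} {q : Nat × Nat} : ∀ {R : List (Nat × Nat)},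
    q ∈ R → q.1 ≤ mid ∧ mid ≤ q.2 → (∀ p ∈ R, p.1 ≤ mid ∧ mid ≤ p.2 → p = q) →
    findContaining mid R = some q := by
  intro R
  induction R with
  | nil => intro h; simp at h
  | cons r rest ih =>
    intro hmem hq huniq
    obtain ⟨s, e⟩ := r
    by_cases hc : s ≤ mid ∧ mid ≤ e
    · have : (s, e) = q := huniq (s, e) (by simp) hc
      simp [findContaining, hc, this]
    · rcases List.mem_cons.mp hmem with h | h
      · subst h
        exact absurd hq hc
      · simp [findContaining, hc]
        exact ih h hq (fun p hp => huniq p (by simp [hp]))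

-- basic facts about the Python tuple order
theorem pLt_irrefl (p : Int × Int × Int) : pLt p p = false := by
  obtain ⟨a, b, c⟩ := p; simp [pLt]

theorem pLt_asymm {p q : Int × Int × Int} (h : pLt p q = true) : pLt q p = false := by
  obtain ⟨a, b, c⟩ := p; obtain ⟨a', b', c'⟩ := q
  simp [pLt] at h ⊢
  omega

theorem pLt_trans {p q r : Int × Int × Int} (h1 : pLt p q = true) (h2 : pLt q r = true) :
    pLt p r = true := by
  obtain ⟨a, b, c⟩ := p; obtain ⟨a', b', c'⟩ := q; obtain ⟨a'', b'', c''⟩ := r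
  simp [pLt] at h1 h2 ⊢
  omega

theorem pLt_total {p q : Int × Int × Int} (h : p ≠ q) : pLt p q = true ∨ pLt q p = true := by
  obtain ⟨a, b, c⟩ := p; obtain ⟨a', b', c'⟩ := q
  simp [Prod.ext_iff] at h
  simp [pLt]
  omega

theorem pLt_of_fst_lt {p q : Int × Int × Int} (h : p.1 < q.1) : pLt p q = true := by
  obtain ⟨a, b, c⟩ := p; obtain ⟨a', b', c'⟩ := q
  simp at h
  simp [pLt]
  omega

-- the priority of a region entirely left / right of mid
theorem prioA_left {mid s e : Nat} (h1 : s ≤ e) (h2 : e < mid) :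
    prioA mid s e = ((mid : Int) - e, -((e : Int) - s + 1), -(s : Int)) := by
  unfold prioA
  have ha : |(s : Int) - mid| = (mid : Int) - s := by
    rw [abs_sub_comm]; exact abs_of_nonneg (by omega)
  have hb : |(e : Int) - mid| = (mid : Int) - e := by
    rw [abs_sub_comm]; exact abs_of_nonneg (by omega)
  rw [ha, hb, min_eq_right (by omega)]

theorem prioA_right {mid s e : Nat} (h1 : s ≤ e) (h2 : mid < s) :
    prioA mid s e = ((s : Int) - mid, -((e : Int) - s + 1), -(s : Int)) := by
  unfold prioA
  have ha : |(s : Int) - mid| = (s : Int) - mid := abs_of_nonneg (by omega)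
  have hb : |(e : Int) - mid| = (e : Int) - mid := abs_of_nonneg (by omega)
  rw [ha, hb, min_eq_left (by omega)]

-- the fold of A's second selection loop returns the unique strict minimiser
theorem fold_best (mid : Nat) (m : Nat × Nat) :
    ∀ (R : List (Nat × Nat)) (acc : Option ((Nat × Nat) × (Int × Int × Int))),
    (∀ r ∈ R, r ≠ m → pLt (prioA mid m.1 m.2) (prioA mid r.1 r.2) = true) →
    ((m ∈ R ∧ (acc = none ∨ ∃ x, acc = some (x, prioA mid x.1 x.2) ∧
        pLt (prioA mid m.1 m.2) (prioA mid x.1 x.2) = true)) ∨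
      acc = some (m, prioA mid m.1 m.2)) →
    R.foldl (bestStep mid) acc = some (m, prioA mid m.1 m.2) := by
  intro R
  induction R with
  | nil =>
    intro acc _ hinv
    rcases hinv with ⟨hmem, _⟩ | hacc
    · simp at hmem
    · simpa using hacc
  | cons r rest ih =>
    intro acc hdom hinv
    have hdom' : ∀ r' ∈ rest, r' ≠ m → pLt (prioA mid m.1 m.2) (prioA mid r'.1 r'.2) = true :=
      fun r' hr' => hdom r' (by simp [hr'])
    simp only [List.foldl_cons]
    rcases hinv with ⟨hmem, hacc⟩ | hacc
    · rcases hacc with hacc | ⟨x, hacc, hx⟩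
      · -- acc = none : it becomes (r, prio r)
        subst hacc
        by_cases hrm : r = m
        · subst hrm
          exact ih _ hdom' (Or.inr (by simp [bestStep]))
        · have hmem' : m ∈ rest := by
            rcases List.mem_cons.mp hmem with h | h
            · exact absurd h.symm hrm
            · exact h
          exact ih _ hdom' (Or.inl ⟨hmem', Or.inr ⟨r, by simp [bestStep], hdom r (by simp) hrm⟩⟩)
      · -- acc = some (x, px) with pm < px
        subst hacc
        by_cases hrm : r = m
        · subst hrm
          have : bestStep mid (some (x, prioA mid x.1 x.2)) r = some (r, prioA mid r.1 r.2) := by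
            simp [bestStep, hx]
          rw [this]
          exact ih _ hdom' (Or.inr rfl)
        · have hmem' : m ∈ rest := by
            rcases List.mem_cons.mp hmem with h | h
            · exact absurd h.symm hrm
            · exact h
          have hmr : pLt (prioA mid m.1 m.2) (prioA mid r.1 r.2) = true := hdom r (by simp) hrm
          by_cases hrx : pLt (prioA mid r.1 r.2) (prioA mid x.1 x.2) = true
          · have : bestStep mid (some (x, prioA mid x.1 x.2)) r = some (r, prioA mid r.1 r.2) := by
              simp [bestStep, hrx]
            rw [this]
            exact ih _ hdom' (Or.inl ⟨hmem', Or.inr ⟨r, rfl, hmr⟩⟩)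
          · have : bestStep mid (some (x, prioA mid x.1 x.2)) r = some (x, prioA mid x.1 x.2) := by
              simp [bestStep]
              intro h
              exact absurd h hrx
            rw [this]
            exact ih _ hdom' (Or.inl ⟨hmem', Or.inr ⟨x, rfl, hx⟩⟩)
    · -- acc already holds the minimiser
      subst hacc
      by_cases hrm : r = m
      · subst hrm
        have : bestStep mid (some (r, prioA mid r.1 r.2)) r = some (r, prioA mid r.1 r.2) := by
          simp [bestStep, pLt_irrefl]
        rw [this]
        exact ih _ hdom' (Or.inr rfl)
      · have hmr := hdom r (by simp) hrm
        have : bestStep mid (some (m, prioA mid m.1 m.2)) r = some (m, prioA mid m.1 m.2) := by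
          simp [bestStep, pLt_asymm hmr]
        rw [this]
        exact ih _ hdom' (Or.inr rfl)

-- ===== VERDICT (by name: the statement is the Claim_ definition above) =====
theorem ccd_road_find_spec : Claim_equal_ccd_road_find := by
  intro d _
  unfold Spec_ccd_road_find
  by_cases hn0 : d.length = 0
  · unfold ccd_road_find ccd_road_find_alt
    simp [hn0]
  have hmidlt : d.length / 2 < d.length := Nat.div_lt_self (by omega) (by omega)
  obtain ⟨hsound, hcov⟩ := fw_spec d d 0 none (by simp) (by omega)
    (by intro s0 h0; simp at h0) (fun _ => Or.inl rfl)
  by_cases hWmid : W d (d.length / 2)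
  · -- mid is white : the unique run containing mid wins on both sides
    obtain ⟨hL1, hL2, hL3⟩ := expandL_spec d (d.length / 2) hWmid
    obtain ⟨hR1, hR2, hR3⟩ := expandR_spec d (d.length - d.length / 2) (d.length / 2) rfl hWmid
    have hrun : IsRun d (expandL d (d.length / 2), expandR d d.length (d.length / 2)) := by
      refine ⟨by simp; omega, ?_, ?_, hL3, hR3⟩
      · exact W_lt_length (hR2 _ hR1 (le_refl _))
      · intro t h1 h2
        by_cases hm : t ≤ d.length / 2
        · exact hL2 t h1 hm
        · exact hR2 t (by omega) h2
    obtain ⟨p, hpR, hp1, hp2⟩ := hcov (d.length / 2) hWmid (Or.inl (Nat.zero_le _))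
    have hpeq : p = (expandL d (d.length / 2), expandR d d.length (d.length / 2)) :=
      run_unique (hsound p hpR) hrun hp1 hp2 hL1 hR1
    have hmem : (expandL d (d.length / 2), expandR d d.length (d.length / 2)) ∈
        findWhiteRegions d 0 none := hpeq ▸ hpR
    have hfc : findContaining (d.length / 2) (findWhiteRegions d 0 none) =
        some (expandL d (d.length / 2), expandR d d.length (d.length / 2)) := by
      apply findContaining_some hmem ⟨hL1, hR1⟩
      intro q hq hqc
      exact run_unique (hsound q hq) hrun hqc.1 hqc.2 hL1 hR1
    have hsel : selectMainRegion (findWhiteRegions d 0 none) (d.length / 2) =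
        some (expandL d (d.length / 2), expandR d d.length (d.length / 2)) := by
      unfold selectMainRegion
      rw [hfc]
    cases hRc : findWhiteRegions d 0 none with
    | nil => rw [hRc] at hmem; simp at hmem
    | cons p0 tail =>
      rw [hRc] at hsel
      unfold ccd_road_find ccd_road_find_alt
      simp only [if_neg hn0, hRc, hsel]
      rw [if_pos (show d.getD (d.length / 2) 0 = 100 from hWmid)]
  · -- mid is not white : no region contains mid
    have hnc : ∀ p ∈ findWhiteRegions d 0 none, ¬ (p.1 ≤ d.length / 2 ∧ d.length / 2 ≤ p.2) := by
      intro p hp hc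
      exact hWmid ((hsound p hp).2.2.1 _ hc.1 hc.2)
    have hfc : findContaining (d.length / 2) (findWhiteRegions d 0 none) = none :=
      findContaining_none hnc
    cases hL : scanL d (d.length / 2) with
    | none =>
      have hnl : ∀ t, t < d.length / 2 → ¬ W d t := scanL_none d _ hL
      cases hRs : scanR d d.length (d.length / 2 + 1) with
      | none =>
        -- no white pixel at all : both sides return (0,0,0)
        have hnr : ∀ t, d.length / 2 + 1 ≤ t → ¬ W d t := scanR_none d _ _ rfl hRs
        have hnoW : ∀ t, ¬ W d t := by
          intro t
          rcases Nat.lt_trichotomy t (d.length / 2) with h | h | h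
          · exact hnl t h
          · exact h ▸ hWmid
          · exact hnr t (by omega)
        have hRnil : findWhiteRegions d 0 none = [] := by
          cases hRc : findWhiteRegions d 0 none with
          | nil => rfl
          | cons p tail =>
            exfalso
            have hp := hsound p (by rw [hRc]; simp)
            exact hnoW p.1 (hp.2.2.1 p.1 (le_refl _) hp.1)
        unfold ccd_road_find ccd_road_find_alt
        simp only [if_neg hn0, hRnil]
        rw [if_neg (show ¬ d.getD (d.length / 2) 0 = 100 from hWmid), hL, hRs]
      | some k =>
        -- only a right run exists
        obtain ⟨hk1, hk2, hkW, hk4⟩ := scanR_some d _ _ k rfl hRs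
        obtain ⟨he1, he2, he3⟩ := expandR_spec d (d.length - k) k rfl hkW
        have hrunR : IsRun d (k, expandR d d.length k) := by
          refine ⟨he1, W_lt_length (he2 (expandR d d.length k) he1 (le_refl _)), ?_, ?_, he3⟩
          · intro t h1 h2; exact he2 t h1 h2
          · right
            intro hWk1
            have hkm : d.length / 2 ≤ k - 1 := by omega
            rcases Nat.eq_or_lt_of_le hkm with h | h
            · exact hWmid (h ▸ hWk1)
            · exact hk4 (k - 1) (by omega) (by omega) hWk1
        obtain ⟨p, hpR, hp1, hp2⟩ := hcov k hkW (Or.inl (Nat.zero_le _))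
        have hpeq : p = (k, expandR d d.length k) :=
          run_unique (hsound p hpR) hrunR hp1 hp2 (le_refl _) he1
        have hmem : (k, expandR d d.length k) ∈ findWhiteRegions d 0 none := hpeq ▸ hpR
        have hdom : ∀ r ∈ findWhiteRegions d 0 none, r ≠ (k, expandR d d.length k) →
            pLt (prioA (d.length / 2) k (expandR d d.length k)) (prioA (d.length / 2) r.1 r.2)
              = true := by
          intro r hr hne
          obtain ⟨hr1, hr2, hrw, hrl, hrr⟩ := hsound r hr
          have hside : r.2 < d.length / 2 ∨ d.length / 2 < r.1 := by
            have := hnc r hr; omega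
          rcases hside with h | h
          · exact absurd (hrw r.2 hr1 (le_refl _)) (hnl r.2 h)
          · have hWr1 : W d r.1 := hrw r.1 (le_refl _) hr1
            have hr1k : k ≤ r.1 := by
              by_contra hc
              exact hk4 r.1 (by omega) (by omega) hWr1
            have hr1k' : k ≠ r.1 := by
              intro he
              exact hne (run_unique (hsound r hr) hrunR (le_refl _) hr1
                (show k ≤ r.1 by omega) (show r.1 ≤ expandR d d.length k by omega))
            rw [prioA_right he1 (by omega), prioA_right hr1 h]
            exact pLt_of_fst_lt (by simp; omega)
        have hfold : (findWhiteRegions d 0 none).foldl (bestStep (d.length / 2)) none =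
            some ((k, expandR d d.length k),
              prioA (d.length / 2) k (expandR d d.length k)) :=
          fold_best _ _ _ none hdom (Or.inl ⟨hmem, Or.inl rfl⟩)
        have hsel : selectMainRegion (findWhiteRegions d 0 none) (d.length / 2) =
            some (k, expandR d d.length k) := by
          unfold selectMainRegion
          rw [hfc, hfold]
        cases hRc : findWhiteRegions d 0 none with
        | nil => rw [hRc] at hmem; simp at hmem
        | cons p0 tail =>
          rw [hRc] at hsel
          unfold ccd_road_find ccd_road_find_alt
          simp only [if_neg hn0, hRc, hsel]
          rw [if_neg (show ¬ d.getD (d.length / 2) 0 = 100 from hWmid), hL, hRs]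
    | some j =>
      obtain ⟨hj1, hjW, hj3⟩ := scanL_some d _ j hL
      obtain ⟨hs1, hs2, hs3⟩ := expandL_spec d j hjW
      have hrunL : IsRun d (expandL d j, j) := by
        refine ⟨hs1, W_lt_length hjW, ?_, hs3, ?_⟩
        · intro t h1 h2; exact hs2 t h1 h2
        · intro hWj1
          rcases Nat.eq_or_lt_of_le (show j + 1 ≤ d.length / 2 from by omega) with h | h
          · exact hWmid (h ▸ hWj1)
          · exact hj3 (j + 1) (by omega) h hWj1
      obtain ⟨p, hpR, hp1, hp2⟩ := hcov j hjW (Or.inl (Nat.zero_le _))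
      have hpeq : p = (expandL d j, j) :=
        run_unique (hsound p hpR) hrunL hp1 hp2 hs1 (le_refl _)
      have hmemL : (expandL d j, j) ∈ findWhiteRegions d 0 none := hpeq ▸ hpR
      -- any other region entirely left of mid is strictly farther than (expandL j, j)
      have hdomL : ∀ r ∈ findWhiteRegions d 0 none, r ≠ (expandL d j, j) →
          r.2 < d.length / 2 →
          pLt (prioA (d.length / 2) (expandL d j) j) (prioA (d.length / 2) r.1 r.2) = true := by
        intro r hr hne h
        obtain ⟨hr1, hr2, hrw, hrl, hrr⟩ := hsound r hr
        have hWr2 : W d r.2 := hrw r.2 hr1 (le_refl _)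
        have hr2j : r.2 ≤ j := by
          by_contra hc
          exact hj3 r.2 (by omega) h hWr2
        have hr2j' : r.2 ≠ j := by
          intro he
          exact hne (run_unique (hsound r hr) hrunL hr1 (le_refl _)
            (show expandL d j ≤ r.2 by omega) (le_of_eq he))
        rw [prioA_left hs1 hj1, prioA_left hr1 h]
        exact pLt_of_fst_lt (by simp; omega)
      cases hRs : scanR d d.length (d.length / 2 + 1) with
      | none =>
        -- only a left run exists
        have hnr : ∀ t, d.length / 2 + 1 ≤ t → ¬ W d t := scanR_none d _ _ rfl hRs
        have hdom : ∀ r ∈ findWhiteRegions d 0 none, r ≠ (expandL d j, j) →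
            pLt (prioA (d.length / 2) (expandL d j) j) (prioA (d.length / 2) r.1 r.2) = true := by
          intro r hr hne
          obtain ⟨hr1, hr2, hrw, hrl, hrr⟩ := hsound r hr
          have hside : r.2 < d.length / 2 ∨ d.length / 2 < r.1 := by
            have := hnc r hr; omega
          rcases hside with h | h
          · exact hdomL r hr hne h
          · exact absurd (hrw r.1 (le_refl _) hr1) (hnr r.1 (by omega))
        have hfold : (findWhiteRegions d 0 none).foldl (bestStep (d.length / 2)) none =
            some ((expandL d j, j), prioA (d.length / 2) (expandL d j) j) :=
          fold_best _ _ _ none hdom (Or.inl ⟨hmemL, Or.inl rfl⟩)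
        have hsel : selectMainRegion (findWhiteRegions d 0 none) (d.length / 2) =
            some (expandL d j, j) := by
          unfold selectMainRegion
          rw [hfc, hfold]
        cases hRc : findWhiteRegions d 0 none with
        | nil => rw [hRc] at hmemL; simp at hmemL
        | cons p0 tail =>
          rw [hRc] at hsel
          unfold ccd_road_find ccd_road_find_alt
          simp only [if_neg hn0, hRc, hsel]
          rw [if_neg (show ¬ d.getD (d.length / 2) 0 = 100 from hWmid), hL, hRs]
      | some k =>
        -- runs on both sides : compare the two nearest candidates
        obtain ⟨hk1, hk2, hkW, hk4⟩ := scanR_some d _ _ k rfl hRs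
        obtain ⟨he1, he2, he3⟩ := expandR_spec d (d.length - k) k rfl hkW
        have hrunR : IsRun d (k, expandR d d.length k) := by
          refine ⟨he1, W_lt_length (he2 (expandR d d.length k) he1 (le_refl _)), ?_, ?_, he3⟩
          · intro t h1 h2; exact he2 t h1 h2
          · right
            intro hWk1
            have hkm : d.length / 2 ≤ k - 1 := by omega
            rcases Nat.eq_or_lt_of_le hkm with h | h
            · exact hWmid (h ▸ hWk1)
            · exact hk4 (k - 1) (by omega) (by omega) hWk1
        obtain ⟨q, hqR, hq1, hq2⟩ := hcov k hkW (Or.inl (Nat.zero_le _))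
        have hqeq : q = (k, expandR d d.length k) :=
          run_unique (hsound q hqR) hrunR hq1 hq2 (le_refl _) he1
        have hmemR : (k, expandR d d.length k) ∈ findWhiteRegions d 0 none := hqeq ▸ hqR
        have hdomR : ∀ r ∈ findWhiteRegions d 0 none, r ≠ (k, expandR d d.length k) →
            d.length / 2 < r.1 →
            pLt (prioA (d.length / 2) k (expandR d d.length k)) (prioA (d.length / 2) r.1 r.2)
              = true := by
          intro r hr hne h
          obtain ⟨hr1, hr2, hrw, hrl, hrr⟩ := hsound r hr
          have hWr1 : W d r.1 := hrw r.1 (le_refl _) hr1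
          have hr1k : k ≤ r.1 := by
            by_contra hc
            exact hk4 r.1 (by omega) (by omega) hWr1
          have hr1k' : k ≠ r.1 := by
            intro he
            exact hne (run_unique (hsound r hr) hrunR (le_refl _) hr1
              (show k ≤ r.1 by omega) (show r.1 ≤ expandR d d.length k by omega))
          rw [prioA_right he1 (by omega), prioA_right hr1 h]
          exact pLt_of_fst_lt (by simp; omega)
        have hpneq : prioA (d.length / 2) k (expandR d d.length k) ≠
            prioA (d.length / 2) (expandL d j) j := by
          rw [prioA_right he1 (by omega), prioA_left hs1 hj1]
          intro hcontra
          have h3 := congrArg (fun p : Int × Int × Int => p.2.2) hcontra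
          simp at h3
          omega
        have hLR : (expandL d j, j) ≠ (k, expandR d d.length k) := by
          intro hcontra
          have := congrArg Prod.snd hcontra
          simp at this
          omega
        by_cases hcmp : pLt (prioA (d.length / 2) k (expandR d d.length k))
            (prioA (d.length / 2) (expandL d j) j) = true
        · -- the right run wins
          have hdom : ∀ r ∈ findWhiteRegions d 0 none, r ≠ (k, expandR d d.length k) →
              pLt (prioA (d.length / 2) k (expandR d d.length k))
                (prioA (d.length / 2) r.1 r.2) = true := by
            intro r hr hne
            obtain ⟨hr1, hr2, hrw, hrl, hrr⟩ := hsound r hr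
            have hside : r.2 < d.length / 2 ∨ d.length / 2 < r.1 := by
              have := hnc r hr; omega
            rcases hside with h | h
            · by_cases hrl' : r = (expandL d j, j)
              · rw [hrl']; exact hcmp
              · exact pLt_trans hcmp (hdomL r hr hrl' h)
            · exact hdomR r hr hne h
          have hfold : (findWhiteRegions d 0 none).foldl (bestStep (d.length / 2)) none =
              some ((k, expandR d d.length k),
                prioA (d.length / 2) k (expandR d d.length k)) :=
            fold_best _ _ _ none hdom (Or.inl ⟨hmemR, Or.inl rfl⟩)
          have hsel : selectMainRegion (findWhiteRegions d 0 none) (d.length / 2) =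
              some (k, expandR d d.length k) := by
            unfold selectMainRegion
            rw [hfc, hfold]
          cases hRc : findWhiteRegions d 0 none with
          | nil => rw [hRc] at hmemR; simp at hmemR
          | cons p0 tail =>
            rw [hRc] at hsel
            unfold ccd_road_find ccd_road_find_alt
            simp only [if_neg hn0, hRc, hsel]
            rw [if_neg (show ¬ d.getD (d.length / 2) 0 = 100 from hWmid), hL, hRs]
            rw [prioA_right he1 (by omega), prioA_left hs1 hj1] at hcmp
            simp only [hcmp]
            simp
        · -- the left run wins (strictly, since the two priorities differ)
          have hLltR : pLt (prioA (d.length / 2) (expandL d j) j)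
              (prioA (d.length / 2) k (expandR d d.length k)) = true := by
            rcases pLt_total hpneq.symm with h | h
            · exact h
            · exact absurd h hcmp
          have hdom : ∀ r ∈ findWhiteRegions d 0 none, r ≠ (expandL d j, j) →
              pLt (prioA (d.length / 2) (expandL d j) j)
                (prioA (d.length / 2) r.1 r.2) = true := by
            intro r hr hne
            obtain ⟨hr1, hr2, hrw, hrl, hrr⟩ := hsound r hr
            have hside : r.2 < d.length / 2 ∨ d.length / 2 < r.1 := by
              have := hnc r hr; omega
            rcases hside with h | h
            · exact hdomL r hr hne h
            · by_cases hrr' : r = (k, expandR d d.length k)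
              · rw [hrr']; exact hLltR
              · exact pLt_trans hLltR (hdomR r hr hrr' h)
          have hfold : (findWhiteRegions d 0 none).foldl (bestStep (d.length / 2)) none =
              some ((expandL d j, j), prioA (d.length / 2) (expandL d j) j) :=
            fold_best _ _ _ none hdom (Or.inl ⟨hmemL, Or.inl rfl⟩)
          have hsel : selectMainRegion (findWhiteRegions d 0 none) (d.length / 2) =
              some (expandL d j, j) := by
            unfold selectMainRegion
            rw [hfc, hfold]
          cases hRc : findWhiteRegions d 0 none with
          | nil => rw [hRc] at hmemL; simp at hmemL
          | cons p0 tail =>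
            rw [hRc] at hsel
            unfold ccd_road_find ccd_road_find_alt
            simp only [if_neg hn0, hRc, hsel]
            rw [if_neg (show ¬ d.getD (d.length / 2) 0 = 100 from hWmid), hL, hRs]
            rw [prioA_right he1 (by omega), prioA_left hs1 hj1] at hcmp
            simp only [Bool.not_eq_true] at hcmp
            simp only [hcmp]
            simp
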